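-- pv_equiv track=rewrite | github.com/thunlp/TLNN | src/utils/metric.py | get_ner_BMES
-- ===== SOURCE A (Python) =====
-- def reverse_style(input_string):
--     target_position = input_string.index('[')
--     input_len = len(input_string)
--     output_string = input_string[target_position:input_len] + input_string[0:target_position]
--     return output_string
--
-- def get_ner_BMES(label_list):
--
--     list_len = len(label_list)
--     begin_label = 'B-'
--     end_label = 'E-'
--     single_label = 'S-'
--     whole_tag = ''
--     index_tag = ''
--     tag_list = []
--     stand_matrix = []
--     for i in range(0, list_len):
--
--         current_label = label_list[i].upper()
--         if begin_label in current_label: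
--             if index_tag != '':
--                 tag_list.append(whole_tag + ',' + str(i-1))
--             whole_tag = current_label.replace(begin_label,"",1) +'[' +str(i)
--             index_tag = current_label.replace(begin_label,"",1)
--         elif single_label in current_label:
--             if index_tag != '':
--                 tag_list.append(whole_tag + ',' + str(i-1))
--             whole_tag = current_label.replace(single_label,"",1) +'[' +str(i)
--             tag_list.append(whole_tag)
--             whole_tag = ""
--             index_tag = ""
--         elif end_label in current_label:
--             if index_tag != '':
--                 tag_list.append(whole_tag +',' + str(i))
--             whole_tag = ''
--             index_tag = ''
--         else:
--             continue
--     if (whole_tag != '')&(index_tag != ''):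
--         if ',' not in whole_tag:
--             whole_tag += ',' + str(list_len-1)
--         tag_list.append(whole_tag)
--     tag_list_len = len(tag_list)
--
--     for i in range(0, tag_list_len):
--         if  len(tag_list[i]) > 0:
--             tag_list[i] = tag_list[i]+ ']'
--             insert_list = reverse_style(tag_list[i])
--             stand_matrix.append(insert_list)
--
--     return stand_matrix
-- ===== SOURCE B (Python) =====
-- def get_ner_BMES(label_list):
--     # Two staged passes: (1) extract the tagged "events" (index, kind, type);
--     # (2) pair each event with its successor to compute span ends -- no running
--     # open-span state, each span is decided locally from one neighbouring event.
--     events = []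
--     for i, lab in enumerate(label_list):
--         cur = lab.upper()
--         if 'B-' in cur:
--             events.append((i, 'B', cur.replace('B-', '', 1)))
--         elif 'S-' in cur:
--             events.append((i, 'S', cur.replace('S-', '', 1)))
--         elif 'E-' in cur:
--             events.append((i, 'E', ''))
--     out = []
--     for (i, k, t), nxt in zip(events, events[1:] + [None]):
--         if k == 'S':
--             out.append('[' + str(i) + ']' + t)
--         elif k == 'B':
--             if nxt is None:
--                 end = len(label_list) - 1
--             elif nxt[1] == 'E':
--                 end = nxt[0]
--             else:
--                 end = nxt[0] - 1
--             out.append('[' + str(i) + ',' + str(end) + ']' + t)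
--     return out
-- ===== Notes on version B (the rewrite author's own statement) =====
-- stated objective: alternative
-- what changed: B replaces A's stateful single pass (whole_tag/index_tag string splicing plus a reverse_style rotation pass) by two staged passes: first extract the tagged labels as (index, kind, type) events, then pair each event with its successor via zip to decide each span's end locally, with no running open-span state and direct '[start(,end)]TYPE' formatting.
-- intended difference: On inputs containing a degenerate tag label whose extracted entity type is empty (A silently drops that entity) or contains '[' (A's reverse_style rotates the output at the type's own bracket), or whose last tagged label is an unclosed B- label with a ',' in its type (A omits the end index, e.g. '[0]A,B'), A's output is garbled by its string-splicing formatting; B uniformly returns the intended '[start,end]TYPE' span (e.g. '[0,0]A,B'). — e.g. on get_ner_BMES(["B-A,B"]): A returns ["[0]A,B"], B returns ["[0,0]A,B"]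
import Mathlib
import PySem

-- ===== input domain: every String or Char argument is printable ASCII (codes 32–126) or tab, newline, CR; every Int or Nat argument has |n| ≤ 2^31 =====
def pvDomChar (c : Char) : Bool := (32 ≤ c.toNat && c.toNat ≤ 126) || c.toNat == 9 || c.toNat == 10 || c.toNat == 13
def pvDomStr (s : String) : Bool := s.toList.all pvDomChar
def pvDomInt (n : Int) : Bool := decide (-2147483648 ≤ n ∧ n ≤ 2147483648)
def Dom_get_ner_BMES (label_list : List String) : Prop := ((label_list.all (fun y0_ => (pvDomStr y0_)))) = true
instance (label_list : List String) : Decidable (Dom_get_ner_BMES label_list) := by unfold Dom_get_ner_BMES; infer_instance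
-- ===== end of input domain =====

-- B replaces A's stateful pass (whole_tag/index_tag splicing + reverse_style rotation) by two
-- staged passes: extract tagged (index, kind, type) events, then pair each event with its
-- successor to decide span ends locally; on degenerate tag labels (empty type, '[' in the type,
-- or a trailing unclosed B- type containing ',') A's splicing garbles the output and B returns
-- the intended span string — stated below as D_get_ner_BMES.

-- ===== PORT A =====
-- shared helper: exact port of u.replace(tag, '', 1) (remove the FIRST occurrence of tag)
def pvReplaceOnce (s pat : List Char) : List Char :=
  let j := PySem.Chars.find s pat
  if j < 0 then s else s.take j.toNat ++ s.drop (j.toNat + pat.length)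

-- reverse_style; A only calls it on strings containing '[', where str.index = Chars.find (never raises)
def pvRevStyle (input_string : List Char) : List Char :=
  let target_position := PySem.Chars.find input_string ['[']
  PySem.List.slice input_string (some target_position) (some (input_string.length : Int)) ++
    PySem.List.slice input_string (some 0) (some target_position)

-- loop body of A: state (whole_tag, index_tag, tag_list), input (i, label)
def pvAStep (st : List Char × List Char × List (List Char)) (p : Int × String) :
    List Char × List Char × List (List Char) :=
  let whole_tag := st.1
  let index_tag := st.2.1
  let tag_list := st.2.2
  let i := p.1
  let current_label := PySem.Chars.upper p.2.toList
  if PySem.Chars.isIn ['B', '-'] current_label then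
    let tag_list := if index_tag ≠ [] then
        tag_list ++ [whole_tag ++ ',' :: PySem.Int.toChars (i - 1)] else tag_list
    (pvReplaceOnce current_label ['B', '-'] ++ '[' :: PySem.Int.toChars i,
      pvReplaceOnce current_label ['B', '-'], tag_list)
  else if PySem.Chars.isIn ['S', '-'] current_label then
    let tag_list := if index_tag ≠ [] then
        tag_list ++ [whole_tag ++ ',' :: PySem.Int.toChars (i - 1)] else tag_list
    let whole_tag := pvReplaceOnce current_label ['S', '-'] ++ '[' :: PySem.Int.toChars i
    ([], [], tag_list ++ [whole_tag])
  else if PySem.Chars.isIn ['E', '-'] current_label then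
    let tag_list := if index_tag ≠ [] then
        tag_list ++ [whole_tag ++ ',' :: PySem.Int.toChars i] else tag_list
    ([], [], tag_list)
  else st

def get_ner_BMES (label_list : List String) : List String :=
  let list_len : Int := (label_list.length : Int)
  let st := (PySem.List.enumerate label_list 0).foldl pvAStep ([], [], [])
  let whole_tag := st.1
  let index_tag := st.2.1
  let tag_list := st.2.2
  let tag_list :=
    if whole_tag ≠ [] ∧ index_tag ≠ [] then
      (if PySem.Chars.isIn [','] whole_tag = false then
        tag_list ++ [whole_tag ++ ',' :: PySem.Int.toChars (list_len - 1)]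
      else tag_list ++ [whole_tag])
    else tag_list
  tag_list.foldl
    (fun stand_matrix t =>
      if 0 < t.length then stand_matrix ++ [String.ofList (pvRevStyle (t ++ [']']))]
      else stand_matrix) []

-- ===== PORT B =====
-- B pass 1: collect the tagged labels as events (index, kind, extracted type)
def pvEvStep (events : List (Int × String × List Char)) (p : Int × String) :
    List (Int × String × List Char) :=
  let cur := PySem.Chars.upper p.2.toList
  if PySem.Chars.isIn ['B', '-'] cur then
    events ++ [(p.1, "B", pvReplaceOnce cur ['B', '-'])]
  else if PySem.Chars.isIn ['S', '-'] cur then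
    events ++ [(p.1, "S", pvReplaceOnce cur ['S', '-'])]
  else if PySem.Chars.isIn ['E', '-'] cur then
    events ++ [(p.1, "E", [])]
  else events

-- B pass 2: one event plus its successor (or none) decides that event's own output
def pvEmit (L : Int) (ev : Int × String × List Char)
    (nxt : Option (Int × String × List Char)) : List String :=
  if ev.2.1 = "S" then
    [String.ofList ('[' :: PySem.Int.toChars ev.1 ++ ']' :: ev.2.2)]
  else if ev.2.1 = "B" then
    let e := match nxt with
      | none => L - 1
      | some n => if n.2.1 = "E" then n.1 else n.1 - 1
    [String.ofList ('[' :: PySem.Int.toChars ev.1 ++ ',' :: PySem.Int.toChars e ++ ']' :: ev.2.2)]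
  else []

def get_ner_BMES_alt (label_list : List String) : List String :=
  let events := (PySem.List.enumerate label_list 0).foldl pvEvStep []
  (events.zip ((events.drop 1).map some ++ [none])).foldl
    (fun out p => out ++ pvEmit (label_list.length : Int) p.1 p.2) []

-- ===== PRECONDITION & SPEC =====
-- pvB t l: the tag t occurs in the uppercased label l
def pvB (t : List Char) (l : String) : Bool := PySem.Chars.isIn t (PySem.Chars.upper l.toList)
def pvBL : List Char := ['B', '-']

-- On inputs containing a degenerate tag label whose extracted entity type is empty (A drops the
-- entity) or contains '[' (A's reverse_style rotates the output at the type's bracket), or whose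
-- last tagged label is an unclosed B- label with ',' in its type (A omits the end index), A's
-- string splicing garbles the output; B returns the intended '[start(,end)]TYPE' span.
def D_get_ner_BMES (label_list : List String) : Prop :=
  label_list.any (fun l => (pvB pvBL l || pvB ['S', '-'] l) && pvB ['['] l ||
    PySem.Chars.upper l.toList == pvBL) = true ∨
  ((label_list.filter fun l => pvB pvBL l || pvB ['S', '-'] l || pvB ['E', '-'] l).getLast?.any
    fun l => pvB pvBL l && pvB [','] l) = true
instance (label_list : List String) : Decidable (D_get_ner_BMES label_list) := by
  unfold D_get_ner_BMES; infer_instance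

def Spec_get_ner_BMES (label_list : List String) (out : List String) : Prop :=
  ¬ D_get_ner_BMES label_list → out = get_ner_BMES_alt label_list
instance (label_list : List String) (out : List String) : Decidable (Spec_get_ner_BMES label_list out) := by
  unfold Spec_get_ner_BMES; infer_instance

def pvDiffWitness_get_ner_BMES : List String := ["B-A,B"]
def pvDiffWitnessOut_get_ner_BMES : (List String) × (List String) := (["[0]A,B"], ["[0,0]A,B"])

-- ===== CLAIM (what is proved, stated in full; the proofs are below) =====
def Claim_unchanged_get_ner_BMES : Prop := ∀ (label_list : List String),
  Dom_get_ner_BMES label_list → Spec_get_ner_BMES label_list (get_ner_BMES label_list)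
def Claim_changed_get_ner_BMES : Prop :=
  Dom_get_ner_BMES (pvDiffWitness_get_ner_BMES) ∧ D_get_ner_BMES (pvDiffWitness_get_ner_BMES) ∧
  get_ner_BMES (pvDiffWitness_get_ner_BMES) = pvDiffWitnessOut_get_ner_BMES.1 ∧
  get_ner_BMES_alt (pvDiffWitness_get_ner_BMES) = pvDiffWitnessOut_get_ner_BMES.2 ∧
  pvDiffWitnessOut_get_ner_BMES.1 ≠ pvDiffWitnessOut_get_ner_BMES.2

-- ===== LEMMAS AND PROOFS =====

-- the uppercased label
def pvU (lab : String) : List Char := lab.toList.map PySem.Chars.upperChar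

-- a degenerate tagged label: a bare 'B-' (empty entity type) or a '[' in a B-/S- label
-- (removing the first 'B-'/'S-' never removes a '[' or ',', so this is a condition on the raw label)
def pvBad (lab : String) : Bool :=
  decide (((['B', '-'] <:+: pvU lab ∨ ['S', '-'] <:+: pvU lab) ∧ ('[' : Char) ∈ pvU lab) ∨
    pvU lab = ['B', '-'])

def pvTagged (lab : String) : Bool :=
  decide (['B', '-'] <:+: pvU lab ∨ ['S', '-'] <:+: pvU lab ∨ ['E', '-'] <:+: pvU lab)

-- the last tagged label is an unclosed B- label whose type contains a comma
def pvTrailingBad (label_list : List String) : Bool :=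
  ((label_list.filter pvTagged).getLast?).any
    (fun lab => decide (['B', '-'] <:+: pvU lab ∧ (',' : Char) ∈ pvU lab))

-- proof-side intermediate: a single stateful pass over structured spans (open span as Option),
-- used as a stepping stone between A's string-splicing fold and B's two staged passes
def pvBStep (st : List (List Char × Int × Option Int) × Option (List Char × Int))
    (p : Int × String) : List (List Char × Int × Option Int) × Option (List Char × Int) :=
  let spans := st.1
  let i := p.1
  let cur := PySem.Chars.upper p.2.toList
  if PySem.Chars.isIn ['B', '-'] cur then
    let spans := match st.2 with
      | some ts => spans ++ [(ts.1, ts.2, some (i - 1))]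
      | none => spans
    (spans, some (pvReplaceOnce cur ['B', '-'], i))
  else if PySem.Chars.isIn ['S', '-'] cur then
    let spans := match st.2 with
      | some ts => spans ++ [(ts.1, ts.2, some (i - 1))]
      | none => spans
    (spans ++ [(pvReplaceOnce cur ['S', '-'], i, none)], none)
  else if PySem.Chars.isIn ['E', '-'] cur then
    ((match st.2 with
      | some ts => spans ++ [(ts.1, ts.2, some i)]
      | none => spans), none)
  else st

def pvFmtSpan (sp : List Char × Int × Option Int) : String :=
  let body := match sp.2.2 with
    | none => PySem.Int.toChars sp.2.1
    | some e => PySem.Int.toChars sp.2.1 ++ ',' :: PySem.Int.toChars e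
  String.ofList ('[' :: body ++ ']' :: sp.1)

def pvFinalize (L : Int)
    (st : List (List Char × Int × Option Int) × Option (List Char × Int)) :
    List (List Char × Int × Option Int) :=
  match st.2 with
  | some ts => st.1 ++ [(ts.1, ts.2, some (L - 1))]
  | none => st.1

-- the tag string A accumulates for a span
def pvTagStr (sp : List Char × Int × Option Int) : List Char :=
  sp.1 ++ '[' :: (PySem.Int.toChars sp.2.1 ++
    (match sp.2.2 with | none => [] | some e => ',' :: PySem.Int.toChars e))

-- state correspondence between A's fold and the span fold
def pvRel (a : List Char × List Char × List (List Char))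
    (b : List (List Char × Int × Option Int) × Option (List Char × Int)) : Prop :=
  a.2.2 = b.1.map pvTagStr ∧ (∀ sp ∈ b.1, ('[' : Char) ∉ sp.1) ∧
  (match b.2 with
  | none => a.1 = [] ∧ a.2.1 = []
  | some ts => a.1 = ts.1 ++ '[' :: PySem.Int.toChars ts.2 ∧ a.2.1 = ts.1 ∧
      ts.1 ≠ [] ∧ ('[' : Char) ∉ ts.1 ∧ 0 ≤ ts.2)

lemma pv_digitChar_isDigit (m : Nat) (h : m < 10) : (Nat.digitChar m).isDigit = true := by
  interval_cases m <;> decide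

lemma pv_toDigitsCore_digits : ∀ (fuel n : Nat) (acc : List Char),
    (∀ c ∈ acc, c.isDigit = true) → ∀ c ∈ Nat.toDigitsCore 10 fuel n acc, c.isDigit = true := by
  intro fuel
  induction fuel with
  | zero => intro n acc hacc c hc; simp only [Nat.toDigitsCore] at hc; exact hacc c hc
  | succ f ih =>
    intro n acc hacc c hc
    simp only [Nat.toDigitsCore] at hc
    split at hc
    · rcases List.mem_cons.mp hc with h | h
      · subst h; exact pv_digitChar_isDigit _ (Nat.mod_lt _ (by omega))
      · exact hacc c h
    · refine ih _ _ ?_ c hc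
      intro d hd
      rcases List.mem_cons.mp hd with h | h
      · subst h; exact pv_digitChar_isDigit _ (Nat.mod_lt _ (by omega))
      · exact hacc d h

lemma pv_toChars_digits (n : Int) (h : 0 ≤ n) : ∀ c ∈ PySem.Int.toChars n, c.isDigit = true := by
  intro c hc
  simp only [PySem.Int.toChars, if_neg (not_lt.mpr h)] at hc
  exact pv_toDigitsCore_digits _ _ _ (by simp) c hc

lemma pv_isIn_singleton (c : Char) (s : List Char) :
    PySem.Chars.isIn [c] s = true ↔ c ∈ s := by
  rw [PySem.Chars.isIn_iff_infix]
  constructor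
  · intro h; exact h.mem (by simp)
  · intro h
    obtain ⟨l1, l2, rfl⟩ := List.mem_iff_append.mp h
    exact ⟨l1, l2, by simp⟩

lemma pv_replaceOnce_subset {u pat : List Char} {c : Char}
    (h : c ∈ pvReplaceOnce u pat) : c ∈ u := by
  simp only [pvReplaceOnce] at h
  split at h
  · exact h
  · rcases List.mem_append.mp h with h' | h'
    · exact List.mem_of_mem_take h'
    · exact List.mem_of_mem_drop h'

lemma pv_replaceOnce_nil {u pat : List Char} (hin : PySem.Chars.isIn pat u = true)
    (hpat : pat ≠ []) (h : pvReplaceOnce u pat = []) : u = pat := by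
  have hinf : pat <:+: u := (PySem.Chars.isIn_iff_infix pat u).mp hin
  have hnn : 0 ≤ PySem.Chars.find u pat := (PySem.Chars.find_nonneg_iff u pat).mpr hinf
  simp only [pvReplaceOnce, if_neg (not_lt.mpr hnn)] at h
  obtain ⟨h1, h2⟩ := List.append_eq_nil_iff.mp h
  have hu : u ≠ [] := by
    rintro rfl
    exact hpat (List.eq_nil_of_infix_nil hinf)
  have hj : (PySem.Chars.find u pat).toNat = 0 := by
    rcases List.take_eq_nil_iff.mp h1 with h' | h'
    · exact h'
    · exact absurd h' hu
  have hpre : pat <+: u := by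
    have := (PySem.Chars.find_spec hnn).1
    rwa [hj, List.drop_zero] at this
  have hlen : u.length ≤ pat.length := by
    have := List.drop_eq_nil_iff.mp h2
    rw [hj] at this
    omega
  exact (hpre.eq_of_length_le hlen).symm

lemma pv_find_append_bracket (t r : List Char) (ht : ('[' : Char) ∉ t) :
    PySem.Chars.find (t ++ '[' :: r) ['['] = (t.length : Int) := by
  have hinf : ['['] <:+: (t ++ '[' :: r) := ⟨t, r, by simp⟩
  have hnn : 0 ≤ PySem.Chars.find (t ++ '[' :: r) ['['] :=
    (PySem.Chars.find_nonneg_iff _ _).mpr hinf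
  obtain ⟨h1, h2⟩ := PySem.Chars.find_spec hnn
  set j := (PySem.Chars.find (t ++ '[' :: r) ['[']).toNat with hj
  have hle : j ≤ t.length := by
    by_contra hgt
    exact h2 t.length (by omega) ⟨r, by simp⟩
  have hne : ¬ j < t.length := by
    intro hlt
    have hd : (t ++ '[' :: r)[j]? = some '[' := by
      have hh := List.head?_drop (l := t ++ '[' :: r) (i := j)
      obtain ⟨l2, hpre⟩ := h1
      rw [← hh, ← hpre]; simp
    rw [List.getElem?_append_left hlt] at hd
    exact ht (List.mem_of_getElem? hd)
  have : j = t.length := by omega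
  omega

lemma pv_revStyle_eq (t r : List Char) (ht : ('[' : Char) ∉ t) :
    pvRevStyle (t ++ '[' :: r) = ('[' :: r) ++ t := by
  simp only [pvRevStyle]
  rw [pv_find_append_bracket t r ht]
  rw [PySem.List.slice_natCast, PySem.List.slice_zero_start, PySem.List.slice_to_natCast]
  congr 1
  · rw [List.drop_left]
    have : (t ++ '[' :: r).length - t.length = ('[' :: r).length := by simp
    rw [this, List.take_length]
  · simp

lemma pv_fmt_eq (sp : List Char × Int × Option Int) (h : ('[' : Char) ∉ sp.1) :
    String.ofList (pvRevStyle (pvTagStr sp ++ [']'])) = pvFmtSpan sp := by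
  obtain ⟨t, s, e?⟩ := sp
  cases e? with
  | none =>
    have h1 : pvTagStr (t, s, none) ++ [']'] =
        t ++ '[' :: (PySem.Int.toChars s ++ [']']) := by simp [pvTagStr]
    rw [h1, pv_revStyle_eq _ _ h]
    simp [pvFmtSpan]
  | some e =>
    have h1 : pvTagStr (t, s, some e) ++ [']'] =
        t ++ '[' :: ((PySem.Int.toChars s ++ ',' :: PySem.Int.toChars e) ++ [']']) := by
      simp [pvTagStr]
    rw [h1, pv_revStyle_eq _ _ h]
    simp [pvFmtSpan]

lemma pv_fold_fmt : ∀ (sps : List (List Char × Int × Option Int)) (acc : List String),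
    (∀ sp ∈ sps, ('[' : Char) ∉ sp.1) →
    (sps.map pvTagStr).foldl
      (fun stand_matrix t =>
        if 0 < t.length then stand_matrix ++ [String.ofList (pvRevStyle (t ++ [']']))]
        else stand_matrix) acc
    = acc ++ sps.map pvFmtSpan := by
  intro sps
  induction sps with
  | nil => intro acc _; simp
  | cons sp sps ih =>
    intro acc hgood
    have hpos : 0 < (pvTagStr sp).length := by simp [pvTagStr]
    simp only [List.map_cons, List.foldl_cons, if_pos hpos]
    rw [pv_fmt_eq sp (hgood sp (List.mem_cons_self))]
    rw [ih _ (fun x hx => hgood x (List.mem_cons_of_mem _ hx))]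
    simp

lemma pv_step_inv : ∀ (ps : List (Int × String)) a b,
    (∀ q ∈ ps, pvBad q.2 = false) → (∀ q ∈ ps, 0 ≤ q.1) → pvRel a b →
    pvRel (ps.foldl pvAStep a) (ps.foldl pvBStep b) := by
  intro ps
  induction ps with
  | nil => intro a b _ _ hrel; exact hrel
  | cons q ps ih =>
    intro a b hbad hnn hrel
    simp only [List.foldl_cons]
    refine ih _ _ (fun x hx => hbad x (List.mem_cons_of_mem _ hx))
      (fun x hx => hnn x (List.mem_cons_of_mem _ hx)) ?_
    obtain ⟨i, lab⟩ := q
    have hb : pvBad lab = false := hbad (i, lab) List.mem_cons_self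
    have hi : (0 : Int) ≤ i := hnn (i, lab) List.mem_cons_self
    obtain ⟨htl, hgood, hop⟩ := hrel
    by_cases hB : PySem.Chars.isIn ['B', '-'] (PySem.Chars.upper lab.toList) = true
    · -- B- branch
      have hBinf : ['B', '-'] <:+: PySem.Chars.upper lab.toList :=
        (PySem.Chars.isIn_iff_infix _ _).mp hB
      have hb2 : ¬ ((('[' : Char) ∈ PySem.Chars.upper lab.toList) ∨
          PySem.Chars.upper lab.toList = ['B', '-']) := by
        intro hor
        have hcontra : pvBad lab = true := by
          simp only [pvBad, decide_eq_true_eq]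
          exact hor.elim (fun hm => Or.inl ⟨Or.inl hBinf, hm⟩) Or.inr
        rw [hb] at hcontra; cases hcontra
      have hne : pvReplaceOnce (PySem.Chars.upper lab.toList) ['B', '-'] ≠ [] :=
        fun h => hb2 (Or.inr (pv_replaceOnce_nil hB (by decide) h))
      have hnb : ('[' : Char) ∉ pvReplaceOnce (PySem.Chars.upper lab.toList) ['B', '-'] :=
        fun h => hb2 (Or.inl (pv_replaceOnce_subset h))
      cases hbop : b.2 with
      | none =>
        rw [hbop] at hop
        have hA : pvAStep a (i, lab) =
            (pvReplaceOnce (PySem.Chars.upper lab.toList) ['B', '-'] ++ '[' :: PySem.Int.toChars i,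
              pvReplaceOnce (PySem.Chars.upper lab.toList) ['B', '-'], a.2.2) := by
          simp [pvAStep, hB, hop.2]
        have hBs : pvBStep b (i, lab) =
            (b.1, some (pvReplaceOnce (PySem.Chars.upper lab.toList) ['B', '-'], i)) := by
          simp [pvBStep, hB, hbop]
        rw [hA, hBs]
        exact ⟨htl, hgood, rfl, rfl, hne, hnb, hi⟩
      | some ts =>
        rw [hbop] at hop
        obtain ⟨hwt, hit, htne, htnb, hts⟩ := hop
        have hA : pvAStep a (i, lab) =
            (pvReplaceOnce (PySem.Chars.upper lab.toList) ['B', '-'] ++ '[' :: PySem.Int.toChars i,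
              pvReplaceOnce (PySem.Chars.upper lab.toList) ['B', '-'],
              a.2.2 ++ [a.1 ++ ',' :: PySem.Int.toChars (i - 1)]) := by
          simp [pvAStep, hB, hit ▸ htne]
        have hBs : pvBStep b (i, lab) =
            (b.1 ++ [(ts.1, ts.2, some (i - 1))],
              some (pvReplaceOnce (PySem.Chars.upper lab.toList) ['B', '-'], i)) := by
          simp [pvBStep, hB, hbop]
        rw [hA, hBs]
        refine ⟨?_, ?_, rfl, rfl, hne, hnb, hi⟩
        · rw [List.map_append, ← htl, hwt]
          simp [pvTagStr]
        · intro sp hsp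
          rcases List.mem_append.mp hsp with h | h
          · exact hgood sp h
          · simp at h; subst h; exact htnb
    · by_cases hS : PySem.Chars.isIn ['S', '-'] (PySem.Chars.upper lab.toList) = true
      · -- S- branch
        have hs2 : ('[' : Char) ∉ PySem.Chars.upper lab.toList := by
          intro hm
          have hcontra : pvBad lab = true := by
            simp only [pvBad, decide_eq_true_eq]
            exact Or.inl ⟨Or.inr ((PySem.Chars.isIn_iff_infix _ _).mp hS), hm⟩
          rw [hb] at hcontra; cases hcontra
        have hsb : ('[' : Char) ∉ pvReplaceOnce (PySem.Chars.upper lab.toList) ['S', '-'] :=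
          fun h => hs2 (pv_replaceOnce_subset h)
        have hsingle : pvReplaceOnce (PySem.Chars.upper lab.toList) ['S', '-'] ++ '[' :: PySem.Int.toChars i =
            pvTagStr (pvReplaceOnce (PySem.Chars.upper lab.toList) ['S', '-'], i, none) := by
          simp [pvTagStr]
        cases hbop : b.2 with
        | none =>
          rw [hbop] at hop
          have hA : pvAStep a (i, lab) =
              ([], [], a.2.2 ++
                [pvReplaceOnce (PySem.Chars.upper lab.toList) ['S', '-'] ++ '[' :: PySem.Int.toChars i]) := by
            simp [pvAStep, hB, hS, hop.2]
          have hBs : pvBStep b (i, lab) =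
              (b.1 ++ [(pvReplaceOnce (PySem.Chars.upper lab.toList) ['S', '-'], i, none)], none) := by
            simp [pvBStep, hB, hS, hbop]
          rw [hA, hBs]
          refine ⟨?_, ?_, rfl, rfl⟩
          · rw [List.map_append, ← htl, hsingle]; simp
          · intro sp hsp
            rcases List.mem_append.mp hsp with h | h
            · exact hgood sp h
            · simp at h; subst h; exact hsb
        | some ts =>
          rw [hbop] at hop
          obtain ⟨hwt, hit, htne, htnb, hts⟩ := hop
          have hA : pvAStep a (i, lab) =
              ([], [], (a.2.2 ++ [a.1 ++ ',' :: PySem.Int.toChars (i - 1)]) ++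
                [pvReplaceOnce (PySem.Chars.upper lab.toList) ['S', '-'] ++ '[' :: PySem.Int.toChars i]) := by
            simp [pvAStep, hB, hS, hit ▸ htne]
          have hBs : pvBStep b (i, lab) =
              ((b.1 ++ [(ts.1, ts.2, some (i - 1))]) ++
                [(pvReplaceOnce (PySem.Chars.upper lab.toList) ['S', '-'], i, none)], none) := by
            simp [pvBStep, hB, hS, hbop]
          rw [hA, hBs]
          refine ⟨?_, ?_, rfl, rfl⟩
          · rw [List.map_append, List.map_append, ← htl, hwt, hsingle]
            simp [pvTagStr]
          · intro sp hsp
            rcases List.mem_append.mp hsp with h | h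
            · rcases List.mem_append.mp h with h' | h'
              · exact hgood sp h'
              · simp at h'; subst h'; exact htnb
            · simp at h; subst h; exact hsb
      · by_cases hE : PySem.Chars.isIn ['E', '-'] (PySem.Chars.upper lab.toList) = true
        · -- E- branch
          cases hbop : b.2 with
          | none =>
            rw [hbop] at hop
            have hA : pvAStep a (i, lab) = ([], [], a.2.2) := by
              simp [pvAStep, hB, hS, hE, hop.2]
            have hBs : pvBStep b (i, lab) = (b.1, none) := by
              simp [pvBStep, hB, hS, hE, hbop]
            rw [hA, hBs]
            exact ⟨htl, hgood, rfl, rfl⟩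
          | some ts =>
            rw [hbop] at hop
            obtain ⟨hwt, hit, htne, htnb, hts⟩ := hop
            have hA : pvAStep a (i, lab) =
                ([], [], a.2.2 ++ [a.1 ++ ',' :: PySem.Int.toChars i]) := by
              simp [pvAStep, hB, hS, hE, hit ▸ htne]
            have hBs : pvBStep b (i, lab) =
                (b.1 ++ [(ts.1, ts.2, some i)], none) := by
              simp [pvBStep, hB, hS, hE, hbop]
            rw [hA, hBs]
            refine ⟨?_, ?_, rfl, rfl⟩
            · rw [List.map_append, ← htl, hwt]
              simp [pvTagStr]
            · intro sp hsp
              rcases List.mem_append.mp hsp with h | h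
              · exact hgood sp h
              · simp at h; subst h; exact htnb
        · -- other labels: both states unchanged
          have hA : pvAStep a (i, lab) = a := by simp [pvAStep, hB, hS, hE]
          have hBs : pvBStep b (i, lab) = b := by simp [pvBStep, hB, hS, hE]
          rw [hA, hBs]
          exact ⟨htl, hgood, hop⟩

lemma pv_open_last : ∀ (ps : List (Int × String)) b,
    ((ps.foldl pvBStep b).2).map Prod.fst =
      (match (ps.filter (fun q => pvTagged q.2)).getLast? with
      | some q => if PySem.Chars.isIn ['B', '-'] (PySem.Chars.upper q.2.toList) = true
          then some (pvReplaceOnce (PySem.Chars.upper q.2.toList) ['B', '-']) else none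
      | none => b.2.map Prod.fst) := by
  intro ps
  induction ps with
  | nil => intro b; rfl
  | cons q ps ih =>
    intro b
    simp only [List.foldl_cons, List.filter_cons]
    by_cases hT : pvTagged q.2 = true
    · rw [if_pos hT]
      rw [ih (pvBStep b q)]
      rcases hf : ps.filter (fun x => pvTagged x.2) with _ | ⟨x, xs⟩
      · rw [hf]
        simp only [List.getLast?_nil, List.getLast?_singleton]
        have hval : (pvBStep b q).2.map Prod.fst =
            (if PySem.Chars.isIn ['B', '-'] (PySem.Chars.upper q.2.toList) = true
              then some (pvReplaceOnce (PySem.Chars.upper q.2.toList) ['B', '-']) else none) := by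
          by_cases hB : PySem.Chars.isIn ['B', '-'] (PySem.Chars.upper q.2.toList) = true
          · simp [pvBStep, hB]
          · by_cases hS : PySem.Chars.isIn ['S', '-'] (PySem.Chars.upper q.2.toList) = true
            · simp [pvBStep, hB, hS]
            · have hE : PySem.Chars.isIn ['E', '-'] (PySem.Chars.upper q.2.toList) = true := by
                have hT' : ['B', '-'] <:+: PySem.Chars.upper q.2.toList ∨
                    ['S', '-'] <:+: PySem.Chars.upper q.2.toList ∨
                    ['E', '-'] <:+: PySem.Chars.upper q.2.toList := by
                  simpa [pvTagged, pvU] using hT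
                rcases hT' with h | h | h
                · exact absurd ((PySem.Chars.isIn_iff_infix _ _).mpr h) hB
                · exact absurd ((PySem.Chars.isIn_iff_infix _ _).mpr h) hS
                · exact (PySem.Chars.isIn_iff_infix _ _).mpr h
              simp [pvBStep, hB, hS, hE]
        exact hval
      · rw [hf, List.getLast?_cons_cons]
        cases hy : (x :: xs).getLast? with
        | none => simp at hy
        | some y => rfl
    · rw [if_neg hT]
      have hid : pvBStep b q = b := by
        have hno : ¬ ['B', '-'] <:+: PySem.Chars.upper q.2.toList ∧
            ¬ ['S', '-'] <:+: PySem.Chars.upper q.2.toList ∧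
            ¬ ['E', '-'] <:+: PySem.Chars.upper q.2.toList := by
          simpa [pvTagged, pvU, not_or] using hT
        have h1 := (PySem.Chars.isIn_eq_false_iff ['B', '-'] (PySem.Chars.upper q.2.toList)).mpr hno.1
        have h2 := (PySem.Chars.isIn_eq_false_iff ['S', '-'] (PySem.Chars.upper q.2.toList)).mpr hno.2.1
        have h3 := (PySem.Chars.isIn_eq_false_iff ['E', '-'] (PySem.Chars.upper q.2.toList)).mpr hno.2.2
        simp [pvBStep, h1, h2, h3]
      rw [hid, ih b]

-- ============ B-side: the two staged passes equal the stateful span fold ============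

-- event classification of one enumerated label (what pass 1 appends, if anything)
def pvEvClass (p : Int × String) : Option (Int × String × List Char) :=
  let cur := PySem.Chars.upper p.2.toList
  if PySem.Chars.isIn ['B', '-'] cur then some (p.1, "B", pvReplaceOnce cur ['B', '-'])
  else if PySem.Chars.isIn ['S', '-'] cur then some (p.1, "S", pvReplaceOnce cur ['S', '-'])
  else if PySem.Chars.isIn ['E', '-'] cur then some (p.1, "E", [])
  else none

lemma pv_evfold : ∀ (ps : List (Int × String)) acc,
    ps.foldl pvEvStep acc = acc ++ ps.filterMap pvEvClass := by
  intro ps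
  induction ps with
  | nil => intro acc; simp
  | cons p ps ih =>
    intro acc
    simp only [List.foldl_cons, List.filterMap_cons]
    have hstep : pvEvStep acc p = acc ++ (pvEvClass p).toList := by
      simp only [pvEvStep, pvEvClass]
      split_ifs <;> simp
    rw [hstep, ih]
    cases pvEvClass p <;> simp

-- the stateful span step, expressed on events
def pvEvApply (b : List (List Char × Int × Option Int) × Option (List Char × Int))
    (ev : Int × String × List Char) :
    List (List Char × Int × Option Int) × Option (List Char × Int) :=
  let closed := match b.2 with
    | some ts => b.1 ++ [(ts.1, ts.2, some (ev.1 - 1))]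
    | none => b.1
  if ev.2.1 = "B" then (closed, some (ev.2.2, ev.1))
  else if ev.2.1 = "S" then (closed ++ [(ev.2.2, ev.1, none)], none)
  else ((match b.2 with
    | some ts => b.1 ++ [(ts.1, ts.2, some ev.1)]
    | none => b.1), none)

lemma pv_bstep_class (b : List (List Char × Int × Option Int) × Option (List Char × Int))
    (p : Int × String) :
    pvBStep b p = (match pvEvClass p with
      | none => b
      | some ev => pvEvApply b ev) := by
  simp only [pvBStep, pvEvClass, pvEvApply]
  split_ifs <;> simp_all

lemma pv_bfold : ∀ (ps : List (Int × String)) b,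
    ps.foldl pvBStep b = (ps.filterMap pvEvClass).foldl pvEvApply b := by
  intro ps
  induction ps with
  | nil => intro b; rfl
  | cons p ps ih =>
    intro b
    simp only [List.foldl_cons, List.filterMap_cons]
    rw [pv_bstep_class]
    cases pvEvClass p with
    | none => exact ih b
    | some ev => simp only [List.foldl_cons]; exact ih _

lemma pv_class_kinds {ps : List (Int × String)} {ev : Int × String × List Char}
    (h : ev ∈ ps.filterMap pvEvClass) : ev.2.1 = "B" ∨ ev.2.1 = "S" ∨ ev.2.1 = "E" := by
  obtain ⟨p, _, hp⟩ := List.mem_filterMap.mp h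
  simp only [pvEvClass] at hp
  split_ifs at hp <;> (cases hp; simp)

-- the string B's pass 2 emits for the open span, decided by the NEXT event (or the list end)
def pvOpClose (L : Int) (op : Option (List Char × Int))
    (evs : List (Int × String × List Char)) : List String :=
  match op with
  | none => []
  | some ts => [pvFmtSpan (ts.1, ts.2, some (match evs.head? with
      | none => L - 1
      | some n => if n.2.1 = "E" then n.1 else n.1 - 1))]

def pvEmitAll (L : Int) : List (Int × String × List Char) → List String
  | [] => []
  | e :: rest => pvEmit L e rest.head? ++ pvEmitAll L rest

lemma pv_emit_S (L : Int) (ev : Int × String × List Char) (nxt : Option (Int × String × List Char))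
    (h : ev.2.1 = "S") : pvEmit L ev nxt = [pvFmtSpan (ev.2.2, ev.1, none)] := by
  simp [pvEmit, h, pvFmtSpan]

lemma pv_emit_B (L : Int) (ev : Int × String × List Char) (nxt : Option (Int × String × List Char))
    (h : ev.2.1 = "B") : pvEmit L ev nxt = pvOpClose L (some (ev.2.2, ev.1)) (nxt.toList) := by
  cases nxt with
  | none => simp [pvEmit, h, pvOpClose, pvFmtSpan]
  | some n => by_cases hn : n.2.1 = "E" <;> simp [pvEmit, h, pvOpClose, pvFmtSpan, hn]

lemma pv_emit_fmt : ∀ (evs : List (Int × String × List Char)) (L : Int)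
    (st : List (List Char × Int × Option Int) × Option (List Char × Int)),
    (∀ ev ∈ evs, ev.2.1 = "B" ∨ ev.2.1 = "S" ∨ ev.2.1 = "E") →
    (pvFinalize L (evs.foldl pvEvApply st)).map pvFmtSpan
      = st.1.map pvFmtSpan ++ pvOpClose L st.2 evs ++ pvEmitAll L evs := by
  intro evs
  induction evs with
  | nil =>
    intro L st _
    cases hop : st.2 <;> simp [pvFinalize, pvOpClose, pvEmitAll, hop]
  | cons e rest ih =>
    intro L st hk
    have hke := hk e List.mem_cons_self
    have hkr : ∀ ev ∈ rest, ev.2.1 = "B" ∨ ev.2.1 = "S" ∨ ev.2.1 = "E" :=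
      fun ev hv => hk ev (List.mem_cons_of_mem _ hv)
    simp only [List.foldl_cons]
    rcases hke with hB | hS | hE
    · -- B event
      have happ : pvEvApply st e =
          ((match st.2 with
            | some ts => st.1 ++ [(ts.1, ts.2, some (e.1 - 1))]
            | none => st.1), some (e.2.2, e.1)) := by
        simp [pvEvApply, hB]
      rw [happ, ih L _ hkr]
      cases hop : st.2 with
      | none =>
        simp only [pvEmitAll, pvOpClose]
        rw [pv_emit_B L e rest.head? hB]
        cases hr : rest.head? <;> simp [pvOpClose]
      | some ts =>
        simp only [pvEmitAll]
        rw [pv_emit_B L e rest.head? hB]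
        cases hr : rest.head? <;> simp [pvOpClose, hr, hB]
    · -- S event
      have happ : pvEvApply st e =
          ((match st.2 with
            | some ts => st.1 ++ [(ts.1, ts.2, some (e.1 - 1))]
            | none => st.1) ++ [(e.2.2, e.1, none)], none) := by
        simp [pvEvApply, hS]
      rw [happ, ih L _ hkr]
      rw [pvEmitAll, pv_emit_S L e rest.head? hS]
      cases hop : st.2 <;> simp [pvOpClose, hS]
    · -- E event
      have happ : pvEvApply st e =
          ((match st.2 with
            | some ts => st.1 ++ [(ts.1, ts.2, some e.1)]
            | none => st.1), none) := by
        simp [pvEvApply, show e.2.1 ≠ "B" by rw [hE]; decide,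
          show e.2.1 ≠ "S" by rw [hE]; decide]
      rw [happ, ih L _ hkr]
      have hemit : pvEmit L e rest.head? = [] := by
        simp [pvEmit, show e.2.1 ≠ "B" by rw [hE]; decide,
          show e.2.1 ≠ "S" by rw [hE]; decide]
      rw [pvEmitAll, hemit]
      cases hop : st.2 <;> simp [pvOpClose, hE]

lemma pv_zip_emit : ∀ (evs : List (Int × String × List Char)) (L : Int) (acc : List String),
    (evs.zip ((evs.drop 1).map some ++ [none])).foldl
      (fun out p => out ++ pvEmit L p.1 p.2) acc = acc ++ pvEmitAll L evs := by
  intro evs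
  induction evs with
  | nil => intro L acc; simp [pvEmitAll]
  | cons e rest ih =>
    intro L acc
    cases rest with
    | nil => simp [pvEmitAll]
    | cons x xs =>
      simp only [List.drop_succ_cons, List.drop_zero, List.map_cons, List.cons_append,
        List.zip_cons_cons, List.foldl_cons]
      rw [show (x :: xs).drop 1 = xs from rfl] at ih
      rw [ih L (acc ++ pvEmit L e (some x))]
      simp [pvEmitAll]

-- B equals the stateful span fold, finalized and formatted
lemma pv_alt_char (labs : List String) :
    get_ner_BMES_alt labs =
      (pvFinalize (labs.length : Int)
        ((PySem.List.enumerate labs 0).foldl pvBStep ([], none))).map pvFmtSpan := by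
  simp only [get_ner_BMES_alt]
  rw [pv_evfold, List.nil_append, pv_zip_emit, List.nil_append, pv_bfold]
  rw [pv_emit_fmt _ _ ([], none) (fun ev hv => pv_class_kinds hv)]
  simp [pvOpClose]

lemma pv_isIn_false_of_not_mem {c : Char} {s : List Char} (h : c ∉ s) :
    PySem.Chars.isIn [c] s = false := by
  cases hx : PySem.Chars.isIn [c] s with
  | false => rfl
  | true => exact absurd ((pv_isIn_singleton c s).mp hx) h


lemma pv_singleton_infix (c : Char) (s : List Char) : [c] <:+: s ↔ c ∈ s := by
  constructor
  · intro h; exact h.mem (by simp)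
  · intro h
    obtain ⟨l1, l2, rfl⟩ := List.mem_iff_append.mp h
    exact ⟨l1, l2, by simp⟩

lemma pv_upper_eq (l : String) : PySem.Chars.upper l.toList = pvU l := by
  simp [PySem.Chars.upper, pvU]

lemma pv_bad_eq (l : String) :
    ((pvB pvBL l || pvB ['S', '-'] l) && pvB ['['] l || PySem.Chars.upper l.toList == pvBL)
      = pvBad l := by
  rw [Bool.eq_iff_iff]
  simp [pvB, pvBL, pvBad, pv_upper_eq, PySem.Chars.isIn_iff_infix, pv_singleton_infix]

lemma pv_tag_eq (l : String) :
    (pvB pvBL l || pvB ['S', '-'] l || pvB ['E', '-'] l) = pvTagged l := by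
  rw [Bool.eq_iff_iff]
  simp [pvB, pvBL, pvTagged, pv_upper_eq, PySem.Chars.isIn_iff_infix, or_assoc]

lemma pv_trail_eq (labs : List String) :
    ((labs.filter fun l => pvB pvBL l || pvB ['S', '-'] l || pvB ['E', '-'] l).getLast?.any
      fun l => pvB pvBL l && pvB [','] l) = pvTrailingBad labs := by
  have hf : (fun l => pvB pvBL l || pvB ['S', '-'] l || pvB ['E', '-'] l) = pvTagged :=
    funext pv_tag_eq
  rw [hf]
  unfold pvTrailingBad
  cases (labs.filter pvTagged).getLast? with
  | none => rfl
  | some l =>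
    simp only [Option.any_some]
    rw [Bool.eq_iff_iff]
    simp [pvB, pvBL, pv_upper_eq, PySem.Chars.isIn_iff_infix, pv_singleton_infix]

-- ===== VERDICT (by name: the statement is the Claim_ definition above) =====
theorem get_ner_BMES_spec : Claim_unchanged_get_ner_BMES := by
  intro labs _
  unfold Spec_get_ner_BMES
  intro hD
  have hbadall : ∀ lab ∈ labs, pvBad lab = false := by
    intro lab hl
    by_contra h
    refine hD (Or.inl ?_)
    rw [List.any_eq_true]
    exact ⟨lab, hl, by rw [pv_bad_eq]; simpa using h⟩
  have htr : pvTrailingBad labs = false := by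
    by_contra h
    exact hD (Or.inr (by rw [pv_trail_eq]; simpa using h))
  rw [pv_alt_char]
  simp only [get_ner_BMES]
  set e := PySem.List.enumerate labs 0 with he
  have hbq : ∀ q ∈ e, pvBad q.2 = false := by
    intro q hq
    apply hbadall
    have hm : q.2 ∈ e.map Prod.snd := List.mem_map_of_mem hq
    rw [he] at hm
    simpa [PySem.List.map_snd_enumerate] using hm
  have hiq : ∀ q ∈ e, 0 ≤ q.1 := by
    intro q hq
    have hm : q.1 ∈ e.map Prod.fst := List.mem_map_of_mem hq
    rw [he] at hm
    rw [PySem.List.map_fst_enumerate] at hm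
    exact ((PySem.List.mem_pyRange_one).mp hm).1
  obtain ⟨htl, hgood, hopm⟩ :=
    pv_step_inv e ([], [], []) ([], none) hbq hiq ⟨rfl, by simp, ⟨rfl, rfl⟩⟩
  cases hop : (e.foldl pvBStep ([], none)).2 with
  | none =>
    rw [hop] at hopm
    rw [if_neg (by simp [hopm.1])]
    rw [htl, pv_fold_fmt _ [] hgood]
    simp [pvFinalize, hop]
  | some ts =>
    rw [hop] at hopm
    obtain ⟨hwt, hit, htne, htnb, hts⟩ := hopm
    have hol := pv_open_last e ([], none)
    rw [hop] at hol
    have hfilt : labs.filter pvTagged = (e.filter (fun q => pvTagged q.2)).map Prod.snd := by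
      conv_lhs => rw [← PySem.List.map_snd_enumerate labs 0, List.filter_map]
      rfl
    have hct : (',' : Char) ∉ ts.1 := by
      rcases hfl : (e.filter (fun q => pvTagged q.2)).getLast? with _ | q
      · rw [hfl] at hol; simp at hol
      · rw [hfl] at hol
        have hol' : Option.map Prod.fst (some ts) =
            (if PySem.Chars.isIn ['B', '-'] (PySem.Chars.upper q.2.toList) = true
              then some (pvReplaceOnce (PySem.Chars.upper q.2.toList) ['B', '-'])
              else none) := hol
        by_cases hBq : PySem.Chars.isIn ['B', '-'] (PySem.Chars.upper q.2.toList) = true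
        · rw [if_pos hBq] at hol'
          have hts1 : ts.1 = pvReplaceOnce (PySem.Chars.upper q.2.toList) ['B', '-'] := by
            simpa using hol'
          unfold pvTrailingBad at htr
          rw [hfilt, List.getLast?_map, hfl] at htr
          simp only [Option.map_some, Option.any_some] at htr
          have hcu : (',' : Char) ∉ PySem.Chars.upper q.2.toList := by
            intro hm
            have hcontra : decide (['B', '-'] <:+: pvU q.2 ∧ (',' : Char) ∈ pvU q.2) = true :=
              decide_eq_true ⟨(PySem.Chars.isIn_iff_infix _ _).mp hBq, hm⟩
            rw [htr] at hcontra; cases hcontra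
          rw [hts1]
          exact fun h => hcu (pv_replaceOnce_subset h)
        · rw [if_neg hBq] at hol'; simp at hol'
    have hcw : PySem.Chars.isIn [','] (ts.1 ++ '[' :: PySem.Int.toChars ts.2) = false := by
      apply pv_isIn_false_of_not_mem
      intro hm
      rcases List.mem_append.mp hm with h | h
      · exact hct h
      · rcases List.mem_cons.mp h with h' | h'
        · exact absurd h' (by decide)
        · have := pv_toChars_digits ts.2 hts ',' h'
          simp at this
    rw [if_pos ⟨by simp [hwt], hit ▸ htne⟩]
    rw [hwt, hcw, if_pos rfl]
    have hemit : (ts.1 ++ '[' :: PySem.Int.toChars ts.2) ++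
        ',' :: PySem.Int.toChars ((labs.length : Int) - 1) =
        pvTagStr (ts.1, ts.2, some ((labs.length : Int) - 1)) := by
      simp [pvTagStr]
    rw [htl, hemit]
    rw [show List.map pvTagStr (List.foldl pvBStep ([], none) e).1 ++
        [pvTagStr (ts.1, ts.2, some ((labs.length : Int) - 1))] =
        List.map pvTagStr ((List.foldl pvBStep ([], none) e).1 ++
          [(ts.1, ts.2, some ((labs.length : Int) - 1))]) from by simp]
    rw [pv_fold_fmt _ [] ?good]
    · simp [pvFinalize, hop]
    · intro sp hsp
      rcases List.mem_append.mp hsp with h | h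
      · exact hgood sp h
      · simp at h; subst h; exact htnb

theorem get_ner_BMES_changed : Claim_changed_get_ner_BMES := by
  unfold Claim_changed_get_ner_BMES; decide
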